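-- pv_equiv track=rewrite | github.com/k6qybsxt/edinet-tool | src/edinet_monitor/services/collector/manifest_filing_import_service.py | merge_manifest_rows_for_filing_sync
-- ===== SOURCE A (Python) =====
-- from typing import Any, Iterable
--
-- DOWNLOAD_STATUS_PRIORITY = {
--     "pending": 0,
--     "error": 1,
--     "downloaded": 2,
-- }
--
-- def _normalize_download_status(status: str | None) -> str:
--     text = str(status or "").strip()
--     if text in DOWNLOAD_STATUS_PRIORITY:
--         return text
--     return "pending"
--
-- def _manifest_row_priority(row: dict[str, Any]) -> tuple[int, str, str]:
--     return (
--         DOWNLOAD_STATUS_PRIORITY[_normalize_download_status(row.get("download_status"))],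
--         str(row.get("submit_date") or ""),
--         str(row.get("source_date") or ""),
--     )
--
-- def merge_manifest_rows_for_filing_sync(
--     manifest_rows: Iterable[dict[str, Any]],
-- ) -> list[dict[str, Any]]:
--     by_doc_id: dict[str, dict[str, Any]] = {}
--
--     for row in manifest_rows:
--         doc_id = str(row.get("doc_id") or "").strip()
--         if not doc_id:
--             continue
--
--         existing = by_doc_id.get(doc_id)
--         if existing is None or _manifest_row_priority(row) >= _manifest_row_priority(existing):
--             by_doc_id[doc_id] = dict(row)
--
--     return sorted(
--         by_doc_id.values(),
--         key=lambda row: (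
--             str(row.get("submit_date") or ""),
--             str(row.get("doc_id") or ""),
--         ),
--     )
-- ===== SOURCE B (Python) =====
-- # B: group-then-select decomposition — first pass groups all rows per doc_id,
-- # second pass picks each group's winner (last row of maximal priority), then sorts.
-- DOWNLOAD_STATUS_PRIORITY = {
--     "pending": 0,
--     "error": 1,
--     "downloaded": 2,
-- }
--
-- def _normalize_download_status(status):
--     text = str(status or "").strip()
--     if text in DOWNLOAD_STATUS_PRIORITY:
--         return text
--     return "pending"
--
-- def _manifest_row_priority(row):
--     return (
--         DOWNLOAD_STATUS_PRIORITY[_normalize_download_status(row.get("download_status"))],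
--         str(row.get("submit_date") or ""),
--         str(row.get("source_date") or ""),
--     )
--
-- def merge_manifest_rows_for_filing_sync(manifest_rows):
--     groups = {}
--     for row in manifest_rows:
--         doc_id = str(row.get("doc_id") or "").strip()
--         if doc_id:
--             groups.setdefault(doc_id, []).append(row)
--
--     winners = []
--     for rows in groups.values():
--         best = rows[0]
--         for row in rows[1:]:
--             if _manifest_row_priority(row) >= _manifest_row_priority(best):
--                 best = row
--         winners.append(dict(best))
--
--     return sorted(
--         winners,
--         key=lambda row: (
--             str(row.get("submit_date") or ""),
--             str(row.get("doc_id") or ""),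
--         ),
--     )
-- ===== Notes on version B (the rewrite author's own statement) =====
-- stated objective: alternative
-- what changed: Replaces A's single-pass keep-best dict (compare-and-overwrite on each row) by a two-phase decomposition: first group all rows per doc_id, then select each group's winner (last row of maximal priority) and sort; same O(n log n) cost.
import Mathlib
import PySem

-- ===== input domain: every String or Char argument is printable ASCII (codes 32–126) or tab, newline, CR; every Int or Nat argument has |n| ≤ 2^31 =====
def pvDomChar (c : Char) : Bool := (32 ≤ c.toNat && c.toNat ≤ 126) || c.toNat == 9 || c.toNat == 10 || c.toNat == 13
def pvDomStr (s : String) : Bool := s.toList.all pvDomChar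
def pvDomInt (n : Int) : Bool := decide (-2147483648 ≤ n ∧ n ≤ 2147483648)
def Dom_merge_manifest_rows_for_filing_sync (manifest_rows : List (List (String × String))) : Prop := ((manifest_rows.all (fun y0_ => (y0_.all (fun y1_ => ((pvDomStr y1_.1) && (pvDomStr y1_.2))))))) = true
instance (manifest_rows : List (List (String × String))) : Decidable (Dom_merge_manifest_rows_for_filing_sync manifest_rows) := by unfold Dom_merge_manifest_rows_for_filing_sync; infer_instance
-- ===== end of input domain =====

-- B replaces A's single-pass compare-and-overwrite dict by a group-then-select-winner
-- decomposition (objective: alternative, same cost). Rows are dicts str -> str.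

-- ===== PORT A =====
-- shared helpers (identical helper code in both Python sources): DOWNLOAD_STATUS_PRIORITY,
-- _normalize_download_status, _manifest_row_priority, and Python tuple >= on (int, str, str).
def pvPrioMap : PySem.Dict String Int :=
  PySem.Dict.mk [("pending", 0), ("error", 1), ("downloaded", 2)]

def pvNormalizeDownloadStatus (status : Option String) : String :=
  -- str(status or "").strip(); membership test in DOWNLOAD_STATUS_PRIORITY
  let text := PySem.Str.strip (status.getD "")
  if pvPrioMap.contains text then text else "pending"

def pvManifestRowPriority (row : List (String × String)) : Int × String × String :=
  -- DOWNLOAD_STATUS_PRIORITY[...] never raises here (the key is normalized), so getD 0 is exact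
  ((pvPrioMap.get? (pvNormalizeDownloadStatus (row.lookup "download_status"))).getD 0,
   (row.lookup "submit_date").getD "",
   (row.lookup "source_date").getD "")

-- Python tuple >= on (int, str, str), lexicographic; exact on the ASCII domain
def pvTupGe (p q : Int × String × String) : Bool :=
  decide (q.1 < p.1) ||
    (p.1 == q.1 && (decide (q.2.1 < p.2.1) ||
      (p.2.1 == q.2.1 && !decide (p.2.2 < q.2.2))))

def pvStepA (d : PySem.Dict String (List (String × String))) (row : List (String × String)) :
    PySem.Dict String (List (String × String)) :=
  let doc_id := PySem.Str.strip ((row.lookup "doc_id").getD "")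
  if doc_id = "" then d
  else
    match d.get? doc_id with
    | none => d.insert doc_id row
    | some existing =>
        if pvTupGe (pvManifestRowPriority row) (pvManifestRowPriority existing) then
          d.insert doc_id row
        else d

def merge_manifest_rows_for_filing_sync (manifest_rows : List (List (String × String))) : List (List (String × String)) :=
  let by_doc_id := manifest_rows.foldl pvStepA PySem.Dict.empty
  PySem.List.sorted2 by_doc_id.values
    (fun row => (row.lookup "submit_date").getD "")
    (fun row => (row.lookup "doc_id").getD "") false

-- ===== PORT B =====
def pvPickBest (rows : List (List (String × String))) : List (String × String) :=
  match rows with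
  | [] => []   -- unreachable: every group is created non-empty
  | b :: rest =>
      rest.foldl (fun best row =>
        if pvTupGe (pvManifestRowPriority row) (pvManifestRowPriority best) then row else best) b

def pvStepB (g : PySem.Dict String (List (List (String × String)))) (row : List (String × String)) :
    PySem.Dict String (List (List (String × String))) :=
  let doc_id := PySem.Str.strip ((row.lookup "doc_id").getD "")
  if doc_id = "" then g
  else g.modify doc_id [] (fun rs => rs ++ [row])   -- groups.setdefault(doc_id, []).append(row)

def merge_manifest_rows_for_filing_sync_alt (manifest_rows : List (List (String × String))) : List (List (String × String)) :=
  let groups := manifest_rows.foldl pvStepB PySem.Dict.empty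
  let winners := groups.values.map pvPickBest
  PySem.List.sorted2 winners
    (fun row => (row.lookup "submit_date").getD "")
    (fun row => (row.lookup "doc_id").getD "") false

-- ===== PRECONDITION & SPEC =====
def Spec_merge_manifest_rows_for_filing_sync (manifest_rows : List (List (String × String))) (out : List (List (String × String))) : Prop := out = merge_manifest_rows_for_filing_sync_alt manifest_rows
instance (manifest_rows : List (List (String × String))) (out : List (List (String × String))) : Decidable (Spec_merge_manifest_rows_for_filing_sync manifest_rows out) := by unfold Spec_merge_manifest_rows_for_filing_sync; infer_instance

-- ===== CLAIM (what is proved, stated in full; the proofs are below) =====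
def Claim_equal_merge_manifest_rows_for_filing_sync : Prop := ∀ (manifest_rows : List (List (String × String))), Dom_merge_manifest_rows_for_filing_sync manifest_rows → Spec_merge_manifest_rows_for_filing_sync manifest_rows (merge_manifest_rows_for_filing_sync manifest_rows)

-- ===== LEMMAS AND PROOFS =====

-- invariant relating A's keep-best dict to B's groups dict
def pvInv (d : PySem.Dict String (List (String × String)))
    (g : PySem.Dict String (List (List (String × String)))) : Prop :=
  d.items = g.items.map (fun p => (p.1, pvPickBest p.2)) ∧
  (∀ p ∈ g.items, p.2 ≠ []) ∧ g.keys.Nodup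

theorem pv_get?_map {ν ν' : Type} (f : ν → ν') (l : List (String × ν)) (k : String) :
    (PySem.Dict.mk (l.map (fun p => (p.1, f p.2))) : PySem.Dict String ν').get? k
      = ((PySem.Dict.mk l : PySem.Dict String ν).get? k).map f := by
  simp [PySem.Dict.get?, List.find?_map, Function.comp_def, Option.map_map]

theorem pv_pickBest_append (rows : List (List (String × String))) (row : List (String × String))
    (h : rows ≠ []) :
    pvPickBest (rows ++ [row])
      = if pvTupGe (pvManifestRowPriority row) (pvManifestRowPriority (pvPickBest rows)) then row
        else pvPickBest rows := by
  cases rows with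
  | nil => exact absurd rfl h
  | cons b rest => simp [pvPickBest, List.foldl_append]

theorem pv_step (row : List (String × String))
    (d : PySem.Dict String (List (String × String)))
    (g : PySem.Dict String (List (List (String × String))))
    (h : pvInv d g) : pvInv (pvStepA d row) (pvStepB g row) := by
  obtain ⟨hitems, hne, hnd⟩ := h
  unfold pvStepA pvStepB
  set doc := PySem.Str.strip ((row.lookup "doc_id").getD "") with hdoc
  by_cases hd : doc = ""
  · simp [hd]; exact ⟨hitems, hne, hnd⟩
  · simp only [if_neg hd]
    -- relate the two lookups
    have hget : d.get? doc = (g.get? doc).map pvPickBest := by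
      obtain ⟨gl⟩ := g
      have := pv_get?_map pvPickBest gl doc
      rw [show PySem.Dict.mk (gl.map (fun p => (p.1, pvPickBest p.2))) = d from
        (PySem.Dict.ext hitems).symm] at this
      exact this
    cases hg : g.get? doc with
    | none =>
      have hdn : d.get? doc = none := by rw [hget, hg]; rfl
      have hcd : d.contains doc = false := (PySem.Dict.get?_eq_none_iff_contains d doc).mp hdn
      have hcg : g.contains doc = false := (PySem.Dict.get?_eq_none_iff_contains g doc).mp hg
      rw [hdn]
      have hmod : g.modify doc [] (fun rs => rs ++ [row]) = g.insert doc [row] := by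
        simp [PySem.Dict.modify, PySem.Dict.getD, hg]
      rw [hmod]
      refine ⟨?_, ?_, PySem.Dict.nodup_keys_insert g doc [row] hnd⟩
      · rw [PySem.Dict.items_insert_of_not_contains d row hcd,
            PySem.Dict.items_insert_of_not_contains g [row] hcg, List.map_append, hitems]
        rfl
      · intro p hp
        rw [PySem.Dict.items_insert_of_not_contains g [row] hcg] at hp
        rcases List.mem_append.mp hp with h1 | h1
        · exact hne p h1
        · simp at h1; subst h1; simp
    | some rows =>
      have hrne : rows ≠ [] := hne (doc, rows) (PySem.Dict.mem_items_of_get?_eq_some g hg)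
      have hds : d.get? doc = some (pvPickBest rows) := by rw [hget, hg]; rfl
      rw [hds]
      have hcg : g.contains doc = true := by
        by_contra hc
        have : g.contains doc = false := by revert hc; cases g.contains doc <;> simp
        rw [(PySem.Dict.get?_eq_none_iff_contains g doc).mpr this] at hg; exact absurd hg (by simp)
      have hcd : d.contains doc = true := by
        by_contra hc
        have : d.contains doc = false := by revert hc; cases d.contains doc <;> simp
        rw [(PySem.Dict.get?_eq_none_iff_contains d doc).mpr this] at hds; exact absurd hds.symm (by simp)
      have hmod : g.modify doc [] (fun rs => rs ++ [row]) = g.insert doc (rows ++ [row]) := by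
        simp [PySem.Dict.modify, PySem.Dict.getD, hg]
      rw [hmod]
      have hgval : ∀ p ∈ g.items, p.1 = doc → p.2 = rows := by
        intro p hp hpk
        have : g.get? p.1 = some p.2 := by
          obtain ⟨pk, pv⟩ := p
          exact PySem.Dict.get?_of_mem_items g hp hnd
        rw [hpk, hg] at this
        exact (Option.some.injEq _ _ ▸ this).symm
      have hnewne : ∀ p ∈ (g.insert doc (rows ++ [row])).items, p.2 ≠ [] := by
        intro p hp
        rw [PySem.Dict.items_insert_of_contains g (rows ++ [row]) hcg] at hp
        obtain ⟨q, hq, hqe⟩ := List.mem_map.mp hp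
        by_cases hk : q.1 == doc
        · rw [if_pos hk] at hqe; subst hqe; simp
        · rw [if_neg hk] at hqe; subst hqe; exact hne q hq
      have hndnew := PySem.Dict.nodup_keys_insert g doc (rows ++ [row]) hnd
      by_cases hge : pvTupGe (pvManifestRowPriority row) (pvManifestRowPriority (pvPickBest rows))
      · simp only [if_pos hge]
        refine ⟨?_, hnewne, hndnew⟩
        rw [PySem.Dict.items_insert_of_contains d row hcd,
            PySem.Dict.items_insert_of_contains g (rows ++ [row]) hcg, hitems,
            List.map_map, List.map_map]
        apply List.map_congr_left
        intro p hp
        by_cases hk : p.1 == doc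
        · simp only [Function.comp_apply, if_pos hk]
          have hp2 : p.2 = rows := hgval p hp (by simpa using hk)
          simp [pv_pickBest_append rows row hrne, hge]
        · have hne' : p.1 ≠ doc := by simpa using hk
          simp [Function.comp_apply, hne']
      · simp only [if_neg hge]
        refine ⟨?_, hnewne, hndnew⟩
        rw [PySem.Dict.items_insert_of_contains g (rows ++ [row]) hcg, hitems, List.map_map]
        apply List.map_congr_left
        intro p hp
        by_cases hk : p.1 == doc
        · have hp2 : p.2 = rows := hgval p hp (by simpa using hk)
          have hpk : p.1 = doc := by simpa using hk
          simp only [Function.comp_apply, if_pos hk]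
          rw [pv_pickBest_append rows row hrne, if_neg hge, ← hpk, ← hp2]
        · have hne' : p.1 ≠ doc := by simpa using hk
          simp [Function.comp_apply, hne']

theorem pv_fold (rows : List (List (String × String)))
    (d : PySem.Dict String (List (String × String)))
    (g : PySem.Dict String (List (List (String × String))))
    (h : pvInv d g) : pvInv (rows.foldl pvStepA d) (rows.foldl pvStepB g) := by
  induction rows generalizing d g with
  | nil => exact h
  | cons r rs ih => exact ih _ _ (pv_step r d g h)

-- ===== VERDICT (by name: the statement is the Claim_ definition above) =====
theorem merge_manifest_rows_for_filing_sync_spec : Claim_equal_merge_manifest_rows_for_filing_sync := by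
  intro manifest_rows _
  unfold Spec_merge_manifest_rows_for_filing_sync
  unfold merge_manifest_rows_for_filing_sync merge_manifest_rows_for_filing_sync_alt
  have hinv : pvInv (manifest_rows.foldl pvStepA PySem.Dict.empty)
      (manifest_rows.foldl pvStepB PySem.Dict.empty) :=
    pv_fold manifest_rows _ _ ⟨rfl, by simp [PySem.Dict.empty], PySem.Dict.nodup_keys_empty⟩
  have hv : (manifest_rows.foldl pvStepA PySem.Dict.empty).values
      = ((manifest_rows.foldl pvStepB PySem.Dict.empty).values).map pvPickBest := by
    rw [PySem.Dict.values, hinv.1, PySem.Dict.values, List.map_map, List.map_map]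
    rfl
  simp only [hv]
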